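-- pv_equiv track=rewrite | github.com/Bala-0-1/Python_Projects | AOPS1/aops_16/aops16.py | spilt_string_by_integers
-- ===== SOURCE A (Python) =====
-- def strip(str1,str2):
--     str3 = ""
--     for i in str1:
--         if i == str2:
--             continue
--         str3 += i
--     return str3
--
-- def spilt_string_by_integers(str1):
--     str1 = strip(str1,".")
--     lst = []
--     start = 0
--     for i in range(len(str1)):
--         if ord(str1[i]) in range(48,58):
--             if i != len(str1)-1 and ord(str1[i+1]) not in range(48,58):
--                 lst.append(str1[start:i+1])
--                 start = i+1
--     return lst
-- ===== SOURCE B (Python) =====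
-- def spilt_string_by_integers(str1):
--     # One pass with an accumulator buffer: skip dots, flush the buffer each time
--     # a digit is immediately followed by a non-digit; the unfinished buffer
--     # (in particular a trailing digit run) is discarded.
--     segments = []
--     buf = ""
--     for c in str1:
--         if c == '.':
--             continue
--         if buf and '0' <= buf[-1] <= '9' and not ('0' <= c <= '9'):
--             segments.append(buf)
--             buf = c
--         else:
--             buf += c
--     return segments
-- ===== Notes on version B (the rewrite author's own statement) =====
-- stated objective: simpler
-- what changed: Replaced the two-pass index loop (separate dot-stripping pass, then a range(len) scan with a start cursor, i+1 lookahead and slicing) by a single left-to-right fold that skips dots and carries the current segment in a buffer, flushing it on a digit->non-digit boundary; no indices or slices.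
import Mathlib
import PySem

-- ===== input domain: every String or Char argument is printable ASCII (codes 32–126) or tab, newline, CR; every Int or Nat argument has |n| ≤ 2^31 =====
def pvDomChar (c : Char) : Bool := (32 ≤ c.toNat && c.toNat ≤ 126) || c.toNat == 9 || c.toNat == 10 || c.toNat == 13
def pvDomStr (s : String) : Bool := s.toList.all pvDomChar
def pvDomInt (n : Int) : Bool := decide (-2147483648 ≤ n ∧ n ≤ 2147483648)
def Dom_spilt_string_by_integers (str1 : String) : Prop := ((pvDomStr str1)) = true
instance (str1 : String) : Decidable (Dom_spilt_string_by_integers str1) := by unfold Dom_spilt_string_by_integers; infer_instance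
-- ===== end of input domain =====

-- B replaces A's two passes (dot-stripping pass, then an index loop with a start cursor,
-- i+1 lookahead and slicing) by a single buffered fold (objective: simpler).

-- ===== PORT A =====
-- helper strip(str1, str2): rebuild the string skipping items equal to str2 (ported on List Char)
def pvStrip (str1 : List Char) (str2 : List Char) : List Char :=
  str1.foldl (fun str3 i => if [i] = str2 then str3 else str3 ++ [i]) []

-- ord(str1[i]) in range(48,58)
def pvOrdDigit (c : Char) : Bool := 48 ≤ c.toNat && c.toNat < 58

-- one iteration of A's `for i in range(len(str1))` loop; state = (lst, start)
def pvStepA (s : List Char) (p : List String × Int) (i : Int) : List String × Int :=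
  if pvOrdDigit (PySem.List.pyGetD s i ' ') = true then
    if i ≠ (s.length : Int) - 1 ∧ pvOrdDigit (PySem.List.pyGetD s (i + 1) ' ') = false then
      (p.1 ++ [String.ofList (PySem.List.slice s (some p.2) (some (i + 1)))], i + 1)
    else p
  else p

def spilt_string_by_integers (str1 : String) : List String :=
  let s := pvStrip str1.toList ['.']
  ((PySem.List.pyRange 0 (s.length : Int) 1).foldl (pvStepA s) ([], 0)).1

-- ===== PORT B =====
-- '0' <= c <= '9'
def pvChDigit (c : Char) : Bool := '0' ≤ c && c ≤ '9'

-- one iteration of B's `for c in str1` loop; state = (segments, buf); buf[-1] is pyGetD buf (-1)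
def pvStepB (p : List String × List Char) (c : Char) : List String × List Char :=
  if c = '.' then p
  else if p.2 ≠ [] ∧ pvChDigit (PySem.List.pyGetD p.2 (-1) ' ') = true ∧ pvChDigit c = false then
    (p.1 ++ [String.ofList p.2], [c])
  else (p.1, p.2 ++ [c])

def spilt_string_by_integers_alt (str1 : String) : List String :=
  (str1.toList.foldl pvStepB ([], [])).1

-- ===== PRECONDITION & SPEC =====
def Spec_spilt_string_by_integers (str1 : String) (out : List String) : Prop := out = spilt_string_by_integers_alt str1
instance (str1 : String) (out : List String) : Decidable (Spec_spilt_string_by_integers str1 out) := by unfold Spec_spilt_string_by_integers; infer_instance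

-- ===== CLAIM (what is proved, stated in full; the proofs are below) =====
def Claim_equal_spilt_string_by_integers : Prop := ∀ (str1 : String), Dom_spilt_string_by_integers str1 → Spec_spilt_string_by_integers str1 (spilt_string_by_integers str1)

-- ===== LEMMAS AND PROOFS =====

-- A's loop state after k iterations
def pvAfold (s : List Char) (k : Nat) : List String × Int :=
  (List.range k).foldl (fun p j => pvStepA s p (Int.ofNat j)) ([], 0)
def pvBfold (s : List Char) (t : Nat) : List String × List Char :=
  (s.take t).foldl pvStepB ([], [])

theorem pvChDigit_eq (c : Char) : pvChDigit c = pvOrdDigit c := by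
  unfold pvChDigit pvOrdDigit
  have h0 : ('0'.val).toNat = 48 := by decide
  have h9 : ('9'.val).toNat = 57 := by decide
  have hc : c.toNat = c.val.toNat := rfl
  simp only [Char.le_def, UInt32.le_iff_toNat_le, h0, h9, hc]
  by_cases h : c.val.toNat ≤ 57 <;> by_cases h2 : 48 ≤ c.val.toNat <;>
    simp_all [Nat.lt_succ_iff] <;> rfl

theorem pvAfold_succ (s : List Char) (k : Nat) :
    pvAfold s (k+1) = pvStepA s (pvAfold s k) (Int.ofNat k) := by
  rw [pvAfold, List.range_succ, List.foldl_append]; rfl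


theorem pvBfold_succ (s : List Char) (t : Nat) (ht : t < s.length) :
    pvBfold s (t+1) = pvStepB (pvBfold s t) s[t] := by
  have h : s.take (t+1) = s.take t ++ [s[t]] := by
    rw [List.take_add_one, List.getElem?_eq_getElem ht]; rfl
  rw [pvBfold, pvBfold, h, List.foldl_append, List.foldl_cons, List.foldl_nil]

theorem pv_inv (s : List Char) (hdot : '.' ∉ s) :
    ∀ k : Nat, k < s.length →
    ∃ st : Nat, st ≤ k ∧
      (pvAfold s k).1 = (pvBfold s (k+1)).1 ∧
      (pvAfold s k).2 = (st : Int) ∧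
      (pvBfold s (k+1)).2 = (s.take (k+1)).drop st := by
  intro k
  induction k with
  | zero =>
    intro hn
    have h0 : s[0] ≠ '.' := fun h => hdot (h ▸ List.getElem_mem hn)
    have h1 : s.take 1 = [s[0]] := by
      cases s with
      | nil => simp at hn
      | cons c t => simp
    refine ⟨0, le_refl 0, ?_, rfl, ?_⟩ <;>
      simp [pvAfold, pvBfold, h1, pvStepB, h0]
  | succ k ih =>
    intro hn
    obtain ⟨st, hst, hout, hstart, hbuf⟩ := ih (by omega)
    have hkn : k < s.length := by omega
    have hk1n : k + 1 < s.length := hn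
    have hlenTake : (s.take (k+1)).length = k+1 := by simp [Nat.min_eq_left hkn]
    have hbufne : (s.take (k+1)).drop st ≠ [] := by
      intro h
      have := congrArg List.length h
      simp [hlenTake] at this
      omega
    have hlast : PySem.List.pyGetD ((s.take (k+1)).drop st) (-1) ' ' = s[k] := by
      rw [PySem.List.pyGetD_neg_one _ ' ' hbufne]
      rw [List.getLast_eq_getElem]
      rw [List.getElem_drop]
      rw [List.getElem_take]
      congr 1
      simp [hlenTake]
      omega
    have hg1 : PySem.List.pyGetD s (Int.ofNat k) ' ' = s[k] := by
      rw [Int.ofNat_eq_natCast, PySem.List.pyGetD_natCast]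
      exact List.getD_eq_getElem _ _ hkn
    have hcast : Int.ofNat k + 1 = ((k+1 : Nat) : Int) := by
      rw [Int.ofNat_eq_natCast]; push_cast; ring
    have hg2 : PySem.List.pyGetD s (Int.ofNat k + 1) ' ' = s[k+1] := by
      rw [hcast, PySem.List.pyGetD_natCast]
      exact List.getD_eq_getElem _ _ hk1n
    have hne : Int.ofNat k ≠ (s.length : Int) - 1 := by
      rw [Int.ofNat_eq_natCast]; omega
    have hdotk : s[k+1] ≠ '.' := fun h => hdot (h ▸ List.getElem_mem hk1n)
    have hA := pvAfold_succ s k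
    have hB := pvBfold_succ s (k+1) hk1n
    have hT : s.take (k+1+1) = s.take (k+1) ++ [s[k+1]] := by
      rw [List.take_add_one, List.getElem?_eq_getElem hk1n]; rfl
    by_cases hd2 : pvOrdDigit s[k+1] = true
    · -- next char is a digit: neither side flushes
      have hA' : pvAfold s (k+1) = pvAfold s k := by
        rw [hA]; unfold pvStepA; rw [hg1, hg2]
        rw [if_neg (show ¬(Int.ofNat k ≠ (s.length : Int) - 1 ∧ pvOrdDigit s[k+1] = false)
              from fun hc => by rw [hd2] at hc; simp at hc)]
        exact ite_self _
      have hB' : pvBfold s (k+1+1)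
          = ((pvBfold s (k+1)).1, (pvBfold s (k+1)).2 ++ [s[k+1]]) := by
        rw [hB]; unfold pvStepB
        rw [if_neg hdotk, hbuf, hlast]
        rw [if_neg]
        intro hc
        simp only [pvChDigit_eq] at hc
        simp [hd2] at hc
      refine ⟨st, by omega, ?_, ?_, ?_⟩
      · rw [hA', hB']; exact hout
      · rw [hA']; exact hstart
      · rw [hB', hbuf, hT,
          List.drop_append_of_le_length (by omega : st ≤ (s.take (k+1)).length)]
    · have hd2' : pvOrdDigit s[k+1] = false := by simpa using hd2
      by_cases hd1 : pvOrdDigit s[k] = true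
      · -- flush on both sides
        have hslice : PySem.List.slice s (some ((st : Nat) : Int)) (some (Int.ofNat k + 1))
            = (s.take (k+1)).drop st := by
          rw [hcast, PySem.List.slice_natCast, List.drop_take]
        have hA' : pvAfold s (k+1)
            = ((pvAfold s k).1 ++ [String.ofList ((s.take (k+1)).drop st)], Int.ofNat k + 1) := by
          rw [hA]; unfold pvStepA; rw [hg1, hg2, hstart]
          rw [if_pos hd1, if_pos ⟨hne, hd2'⟩, hslice]
        have hB' : pvBfold s (k+1+1)
            = ((pvBfold s (k+1)).1 ++ [String.ofList ((s.take (k+1)).drop st)], [s[k+1]]) := by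
          rw [hB]; unfold pvStepB
          rw [if_neg hdotk, hbuf, hlast]
          rw [if_pos ⟨hbufne, by rw [pvChDigit_eq]; exact hd1, by rw [pvChDigit_eq]; exact hd2'⟩]
        refine ⟨k+1, le_refl _, ?_, ?_, ?_⟩
        · rw [hA', hB', hout]
        · rw [hA']; exact hcast
        · rw [hB', hT,
            List.drop_append_of_le_length (by omega : k+1 ≤ (s.take (k+1)).length)]
          simp
      · -- s[k] not a digit: neither side flushes
        have hA' : pvAfold s (k+1) = pvAfold s k := by
          rw [hA]; unfold pvStepA; rw [hg1]
          rw [if_neg hd1]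
        have hB' : pvBfold s (k+1+1)
            = ((pvBfold s (k+1)).1, (pvBfold s (k+1)).2 ++ [s[k+1]]) := by
          rw [hB]; unfold pvStepB
          rw [if_neg hdotk, hbuf, hlast]
          rw [if_neg]
          intro hc
          simp only [pvChDigit_eq] at hc
          exact hd1 hc.2.1
        refine ⟨st, by omega, ?_, ?_, ?_⟩
        · rw [hA', hB']; exact hout
        · rw [hA']; exact hstart
        · rw [hB', hbuf, hT,
            List.drop_append_of_le_length (by omega : st ≤ (s.take (k+1)).length)]

theorem pv_core (s : List Char) (hdot : '.' ∉ s) :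
    ((PySem.List.pyRange 0 (s.length : Int) 1).foldl (pvStepA s) ([], 0)).1
      = (s.foldl pvStepB ([], [])).1 := by
  have hconv : ((PySem.List.pyRange 0 ((s.length : Nat) : Int) 1).foldl (pvStepA s) ([], 0))
      = pvAfold s s.length := by
    rw [PySem.List.pyRange_one, List.foldl_map, pvAfold]
    simp
  rw [hconv]
  have hfold : (s.foldl pvStepB ([], [])) = pvBfold s s.length := by
    rw [pvBfold, List.take_length]
  rw [hfold]
  cases hs : s.length with
  | zero =>
    have : s = [] := List.eq_nil_of_length_eq_zero hs
    subst this
    rfl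
  | succ n =>
    have hn : n < s.length := by omega
    have hlaststep : pvAfold s (n+1) = pvAfold s n := by
      rw [pvAfold_succ]; unfold pvStepA
      rw [if_neg (show ¬(Int.ofNat n ≠ (s.length : Int) - 1 ∧
            pvOrdDigit (PySem.List.pyGetD s (Int.ofNat n + 1) ' ') = false)
          from fun hc => hc.1 (by rw [Int.ofNat_eq_natCast, hs]; push_cast; ring))]
      exact ite_self _
    obtain ⟨st, _, hout, _, _⟩ := pv_inv s hdot n hn
    rw [hlaststep]
    exact hout

-- pvStrip removes exactly the chars equal to '.'
theorem pvStrip_aux (cs : List Char) (acc : List Char) :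
    cs.foldl (fun str3 i => if [i] = ['.'] then str3 else str3 ++ [i]) acc
      = acc ++ cs.filter (· ≠ '.') := by
  induction cs generalizing acc with
  | nil => simp
  | cons c cs ih =>
    rw [List.foldl_cons, ih, List.filter_cons]
    by_cases h : c = '.' <;> simp [h]

theorem pvStrip_eq (cs : List Char) : pvStrip cs ['.'] = cs.filter (· ≠ '.') := by
  unfold pvStrip
  rw [pvStrip_aux cs []]
  rfl

-- B's fold skips dots: folding over cs equals folding over the dot-free list
theorem foldB_filter (cs : List Char) (p : List String × List Char) :
    cs.foldl pvStepB p = (cs.filter (· ≠ '.')).foldl pvStepB p := by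
  induction cs generalizing p with
  | nil => rfl
  | cons c cs ih =>
    rw [List.foldl_cons, List.filter_cons]
    by_cases h : c = '.'
    · subst h
      rw [show pvStepB p '.' = p from if_pos rfl]
      simp [ih]
    · simp [h, ih, List.foldl_cons]

-- ===== VERDICT (by name: the statement is the Claim_ definition above) =====
theorem spilt_string_by_integers_spec : Claim_equal_spilt_string_by_integers := by
  intro str1 _
  unfold Spec_spilt_string_by_integers spilt_string_by_integers spilt_string_by_integers_alt
  rw [foldB_filter, pvStrip_eq]
  exact pv_core _ (by simp)
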